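-- pv_equiv track=rewrite | github.com/dvlab-research/RePlan | replan/pipelines/replan.py | generate_default_attention_rules
-- ===== SOURCE A (Python) =====
-- def generate_default_attention_rules(
--     bbox_data,
--     delete_main_prompt=False,
--     bboxes_attend_to_each_other=True,
--     has_image_prompt=False,
--     symmetric_masking=False
-- ):
--     """Generate default attention rules dictionary"""
--     num_regions = len(bbox_data) if bbox_data else 0
--     components = []
--
--     if not delete_main_prompt:
--         components.append('Main Prompt')
--     if has_image_prompt:
--         components.append('Image Prompt')
--
--     hint_components = [f'Hint {i+1}' for i in range(num_regions)]
--     bbox_components = [f'BBox {i+1}' for i in range(num_regions)]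
--
--     components.extend(hint_components)
--     components.extend(bbox_components)
--     components.append('Background')
--
--     rules = { (q, k): False for q in components for k in components }
--
--     # 1. Self Attention (Basic)
--     if not delete_main_prompt:
--         rules[('Main Prompt', 'Main Prompt')] = True
--     for comp in hint_components:
--         rules[(comp, comp)] = True
--
--     if has_image_prompt:
--         # Image Prompt attends to itself
--         rules[('Image Prompt', 'Image Prompt')] = True
--
--         # Image Prompt 和所有其他组件互相 attend
--         for comp in components:
--             if comp != 'Image Prompt':
--                 rules[('Image Prompt', comp)] = True
--                 rules[(comp, 'Image Prompt')] = True
--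
--     # 2. Image Internal
--     img_components = bbox_components + ['Background']
--     if bboxes_attend_to_each_other:
--         for q_comp in img_components:
--             for k_comp in img_components:
--                 rules[(q_comp, k_comp)] = True
--     else:
--         # Only need to see Background
--         for q_comp in img_components:
--             rules[(q_comp, 'Background')] = True
--             if q_comp == 'Background':
--                 for k in img_components: rules[('Background', k)] = True
--             else:
--                 rules[(q_comp, q_comp)] = True # Self
--
--     # 3. Cross Component
--     if not delete_main_prompt:
--         # Image sees Main Prompt
--         for q_comp in img_components:
--             rules[(q_comp, 'Main Prompt')] = True
--         # Main Prompt sees Image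
--         for k_comp in img_components:
--             rules[('Main Prompt', k_comp)] = True
--
--     for i in range(num_regions):
--         rules[(f'BBox {i+1}', f'Hint {i+1}')] = True
--
--     if symmetric_masking:
--         for i in range(num_regions):
--             rules[(f'Hint {i+1}', f'BBox {i+1}')] = True
--     else:
--         # Text sees all image patches
--         text_components = []
--         if not delete_main_prompt:
--             text_components.append('Main Prompt')
--         text_components.extend(hint_components)
--
--         for q_comp in text_components:
--             for k_comp in img_components:
--                 rules[(q_comp, k_comp)] = True
--
--     return rules
-- ===== SOURCE B (Python) =====
-- def generate_default_attention_rules(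
--     bbox_data,
--     delete_main_prompt=False,
--     bboxes_attend_to_each_other=True,
--     has_image_prompt=False,
--     symmetric_masking=False
-- ):
--     """Classify components once, then decide each (query, key) pair with a single predicate."""
--     n = len(bbox_data) if bbox_data else 0
--     hints = [f'Hint {i+1}' for i in range(n)]
--     bboxes = [f'BBox {i+1}' for i in range(n)]
--     components = (([] if delete_main_prompt else ['Main Prompt'])
--                   + (['Image Prompt'] if has_image_prompt else [])
--                   + hints + bboxes + ['Background'])
--     imgs = bboxes + ['Background']
--     bbox_to_hint = list(zip(bboxes, hints))
--     hintset = set(hints)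
--     imgset = set(imgs)
--     pairset = set(bbox_to_hint)
--
--     def allowed(q, k):
--         return (
--             (q == 'Main Prompt' and k == 'Main Prompt')
--             or (q == k and q in hintset)
--             or (has_image_prompt and (q == 'Image Prompt' or k == 'Image Prompt'))
--             or (q in imgset and k in imgset
--                 and (bboxes_attend_to_each_other or q == 'Background' or k == 'Background' or q == k))
--             or (q in imgset and k == 'Main Prompt')
--             or (q == 'Main Prompt' and k in imgset)
--             or ((q, k) in pairset)
--             or (symmetric_masking and (k, q) in pairset)
--             or (not symmetric_masking and (q == 'Main Prompt' or q in hintset) and k in imgset)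
--         )
--
--     return {(q, k): allowed(q, k) for q in components for k in components}
-- ===== Notes on version B (the rewrite author's own statement) =====
-- stated objective: simpler
-- what changed: A initializes an all-False dict and mutates it through nine sequential rule-setting loops; B builds the component name sets once and fills the dict in a single comprehension whose pure predicate allowed(q,k) is the OR of all rule clauses (valid since A only ever overwrites False with True).
import Mathlib
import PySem

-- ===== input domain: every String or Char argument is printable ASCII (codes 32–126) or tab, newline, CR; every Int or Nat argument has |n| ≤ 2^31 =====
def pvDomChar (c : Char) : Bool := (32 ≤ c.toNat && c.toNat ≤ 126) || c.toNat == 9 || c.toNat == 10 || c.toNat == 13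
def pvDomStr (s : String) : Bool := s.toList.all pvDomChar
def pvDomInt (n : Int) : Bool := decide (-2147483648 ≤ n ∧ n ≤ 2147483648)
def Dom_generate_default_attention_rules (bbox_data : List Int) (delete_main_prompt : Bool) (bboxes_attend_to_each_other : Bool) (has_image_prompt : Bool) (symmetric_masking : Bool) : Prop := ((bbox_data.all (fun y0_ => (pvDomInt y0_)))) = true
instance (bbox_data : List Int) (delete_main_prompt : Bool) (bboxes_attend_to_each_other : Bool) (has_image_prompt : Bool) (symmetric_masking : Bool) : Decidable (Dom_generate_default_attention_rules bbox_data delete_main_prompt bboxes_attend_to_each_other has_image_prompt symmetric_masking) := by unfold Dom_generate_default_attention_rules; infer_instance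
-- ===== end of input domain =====

-- B re-decomposes A: instead of mutating an all-False dict through nine sequential rule loops,
-- it decides each (query, key) pair once with a single pure predicate over set-based component
-- classification; objective: simpler (same O(n^2) cost, not claimed faster).

-- ===== PORT A =====
-- name-list helpers shared by both ports (both Pythons build the same f-string name lists)
def pvHints (n : Int) : List String :=
  (PySem.List.pyRange 0 n 1).map (fun i => "Hint " ++ PySem.Int.toStr (i + 1))
def pvBBoxes (n : Int) : List String :=
  (PySem.List.pyRange 0 n 1).map (fun i => "BBox " ++ PySem.Int.toStr (i + 1))

def generate_default_attention_rules (bbox_data : List Int) (delete_main_prompt : Bool) (bboxes_attend_to_each_other : Bool) (has_image_prompt : Bool) (symmetric_masking : Bool) : List (String × String × Bool) :=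
  let num_regions : Int := if !bbox_data.isEmpty then (bbox_data.length : Int) else 0
  let components : List String :=
    ((if !delete_main_prompt then ["Main Prompt"] else []) ++
     (if has_image_prompt then ["Image Prompt"] else []))
  let hint_components := pvHints num_regions
  let bbox_components := pvBBoxes num_regions
  let components := components ++ hint_components ++ bbox_components ++ ["Background"]
  let rules : PySem.Dict (String × String) Bool :=
    components.foldl (fun d q => components.foldl (fun d k => d.insert (q, k) false) d) PySem.Dict.empty
  -- 1. self attention
  let rules := if !delete_main_prompt then rules.insert ("Main Prompt", "Main Prompt") true else rules
  let rules := hint_components.foldl (fun d c => d.insert (c, c) true) rules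
  let rules := if has_image_prompt then
      let d := rules.insert ("Image Prompt", "Image Prompt") true
      components.foldl (fun d c =>
        if c != "Image Prompt" then (d.insert ("Image Prompt", c) true).insert (c, "Image Prompt") true
        else d) d
    else rules
  -- 2. image internal
  let img_components := bbox_components ++ ["Background"]
  let rules := if bboxes_attend_to_each_other then
      img_components.foldl (fun d q => img_components.foldl (fun d k => d.insert (q, k) true) d) rules
    else
      img_components.foldl (fun d q =>
        let d := d.insert (q, "Background") true
        if q == "Background" then img_components.foldl (fun d k => d.insert ("Background", k) true) d
        else d.insert (q, q) true) rules
  -- 3. cross component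
  let rules := if !delete_main_prompt then
      let d := img_components.foldl (fun d q => d.insert (q, "Main Prompt") true) rules
      img_components.foldl (fun d k => d.insert ("Main Prompt", k) true) d
    else rules
  let rules := (PySem.List.pyRange 0 num_regions 1).foldl
      (fun d i => d.insert ("BBox " ++ PySem.Int.toStr (i + 1), "Hint " ++ PySem.Int.toStr (i + 1)) true) rules
  let rules := if symmetric_masking then
      (PySem.List.pyRange 0 num_regions 1).foldl
        (fun d i => d.insert ("Hint " ++ PySem.Int.toStr (i + 1), "BBox " ++ PySem.Int.toStr (i + 1)) true) rules
    else
      let text_components := (if !delete_main_prompt then ["Main Prompt"] else []) ++ hint_components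
      text_components.foldl (fun d q => img_components.foldl (fun d k => d.insert (q, k) true) d) rules
  rules.items.map (fun p => (p.1.1, p.1.2, p.2))

-- ===== PORT B =====
def pvAllowed (has_image_prompt bboxes_attend_to_each_other symmetric_masking : Bool)
    (hintset imgset : PySem.Set String) (pairset : PySem.Set (String × String)) (q k : String) : Bool :=
  (q == "Main Prompt" && k == "Main Prompt")
  || (q == k && hintset.contains q)
  || (has_image_prompt && (q == "Image Prompt" || k == "Image Prompt"))
  || (imgset.contains q && imgset.contains k &&
      (bboxes_attend_to_each_other || q == "Background" || k == "Background" || q == k))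
  || (imgset.contains q && k == "Main Prompt")
  || (q == "Main Prompt" && imgset.contains k)
  || pairset.contains (q, k)
  || (symmetric_masking && pairset.contains (k, q))
  || (!symmetric_masking && (q == "Main Prompt" || hintset.contains q) && imgset.contains k)

def generate_default_attention_rules_alt (bbox_data : List Int) (delete_main_prompt : Bool) (bboxes_attend_to_each_other : Bool) (has_image_prompt : Bool) (symmetric_masking : Bool) : List (String × String × Bool) :=
  let n : Int := if !bbox_data.isEmpty then (bbox_data.length : Int) else 0
  let hints := pvHints n
  let bboxes := pvBBoxes n
  let components := (if delete_main_prompt then [] else ["Main Prompt"]) ++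
    (if has_image_prompt then ["Image Prompt"] else []) ++ hints ++ bboxes ++ ["Background"]
  let imgs := bboxes ++ ["Background"]
  let bbox_to_hint := bboxes.zip hints
  let hintset := PySem.Set.ofList hints
  let imgset := PySem.Set.ofList imgs
  let pairset := PySem.Set.ofList bbox_to_hint
  components.flatMap (fun q => components.map (fun k =>
    (q, k, pvAllowed has_image_prompt bboxes_attend_to_each_other symmetric_masking hintset imgset pairset q k)))

-- ===== PRECONDITION & SPEC =====
def Spec_generate_default_attention_rules (bbox_data : List Int) (delete_main_prompt : Bool) (bboxes_attend_to_each_other : Bool) (has_image_prompt : Bool) (symmetric_masking : Bool) (out : List (String × String × Bool)) : Prop := out = generate_default_attention_rules_alt bbox_data delete_main_prompt bboxes_attend_to_each_other has_image_prompt symmetric_masking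
instance (bbox_data : List Int) (delete_main_prompt : Bool) (bboxes_attend_to_each_other : Bool) (has_image_prompt : Bool) (symmetric_masking : Bool) (out : List (String × String × Bool)) : Decidable (Spec_generate_default_attention_rules bbox_data delete_main_prompt bboxes_attend_to_each_other has_image_prompt symmetric_masking out) := by unfold Spec_generate_default_attention_rules; infer_instance

-- ===== CLAIM (what is proved, stated in full; the proofs are below) =====
def Claim_equal_generate_default_attention_rules : Prop := ∀ (bbox_data : List Int) (delete_main_prompt : Bool) (bboxes_attend_to_each_other : Bool) (has_image_prompt : Bool) (symmetric_masking : Bool), Dom_generate_default_attention_rules bbox_data delete_main_prompt bboxes_attend_to_each_other has_image_prompt symmetric_masking → Spec_generate_default_attention_rules bbox_data delete_main_prompt bboxes_attend_to_each_other has_image_prompt symmetric_masking (generate_default_attention_rules bbox_data delete_main_prompt bboxes_attend_to_each_other has_image_prompt symmetric_masking)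

-- ===== LEMMAS AND PROOFS =====

-- name constructors and their basic facts
def pvHintName (i : Nat) : String := "Hint " ++ PySem.Int.toStr (↑i + 1)
def pvBBoxName (i : Nat) : String := "BBox " ++ PySem.Int.toStr (↑i + 1)

lemma pvToCharsNat (i : Nat) : PySem.Int.toChars (↑i + 1) = Nat.toDigits 10 (i+1) := by
  rw [PySem.Int.toChars, if_neg (by omega)]; congr 1

lemma pvToDigitsNe (b : Nat) : Nat.toDigits 10 b ≠ [] := by
  rw [Nat.toDigits_eq_if (by norm_num)]; split <;> simp

lemma pvDigitCharInj {x y : Nat} (hx : x < 10) (hy : y < 10) (h : Nat.digitChar x = Nat.digitChar y) : x = y := by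
  interval_cases x <;> interval_cases y <;> first | rfl | (exact absurd h (by decide))

lemma pvToDigitsInj : ∀ (a b : Nat), Nat.toDigits 10 a = Nat.toDigits 10 b → a = b := by
  intro a
  induction a using Nat.strong_induction_on with
  | _ a ih =>
    intro b h
    rw [Nat.toDigits_eq_if (n := a) (by norm_num), Nat.toDigits_eq_if (n := b) (by norm_num)] at h
    split at h <;> split at h
    · exact pvDigitCharInj ‹_› ‹_› (by simpa using h)
    · exact absurd (congrArg List.length h) (by
        cases hne : Nat.toDigits 10 (b / 10) with
        | nil => exact absurd hne (pvToDigitsNe _)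
        | cons c cs => simp [hne])
    · exact absurd (congrArg List.length h) (by
        cases hne : Nat.toDigits 10 (a / 10) with
        | nil => exact absurd hne (pvToDigitsNe _)
        | cons c cs => simp [hne])
    · have h2 := List.append_inj h (by
        have h1 := congrArg List.length h
        simp at h1; omega)
      have hdiv : a / 10 = b / 10 := ih (a / 10) (by omega) _ h2.1
      have hmod : a % 10 = b % 10 := pvDigitCharInj (by omega) (by omega) (by simpa using h2.2)
      omega

lemma pvHintNameList (i : Nat) : (pvHintName i).toList = 'H' :: 'i' :: 'n' :: 't' :: ' ' :: Nat.toDigits 10 (i+1) := by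
  rw [pvHintName, String.toList_append, PySem.Int.toList_toStr, pvToCharsNat]; rfl

lemma pvBBoxNameList (i : Nat) : (pvBBoxName i).toList = 'B' :: 'B' :: 'o' :: 'x' :: ' ' :: Nat.toDigits 10 (i+1) := by
  rw [pvBBoxName, String.toList_append, PySem.Int.toList_toStr, pvToCharsNat]; rfl

@[simp] lemma pvHintName_ne_mp (i : Nat) : ¬ pvHintName i = "Main Prompt" := by
  intro h; have := congrArg String.toList h; rw [pvHintNameList] at this; simp_all
@[simp] lemma pvHintName_ne_ip (i : Nat) : ¬ pvHintName i = "Image Prompt" := by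
  intro h; have := congrArg String.toList h; rw [pvHintNameList] at this; simp_all
@[simp] lemma pvHintName_ne_bg (i : Nat) : ¬ pvHintName i = "Background" := by
  intro h; have := congrArg String.toList h; rw [pvHintNameList] at this; simp_all
@[simp] lemma pvBBoxName_ne_mp (i : Nat) : ¬ pvBBoxName i = "Main Prompt" := by
  intro h; have := congrArg String.toList h; rw [pvBBoxNameList] at this; simp_all
@[simp] lemma pvBBoxName_ne_ip (i : Nat) : ¬ pvBBoxName i = "Image Prompt" := by
  intro h; have := congrArg String.toList h; rw [pvBBoxNameList] at this; simp_all
@[simp] lemma pvBBoxName_ne_bg (i : Nat) : ¬ pvBBoxName i = "Background" := by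
  intro h; have := congrArg String.toList h; rw [pvBBoxNameList] at this; simp_all
@[simp] lemma pvHintName_ne_bb (i j : Nat) : ¬ pvHintName i = pvBBoxName j := by
  intro h; have := congrArg String.toList h; rw [pvHintNameList, pvBBoxNameList] at this; simp_all
@[simp] lemma pvBBoxName_ne_hint (i j : Nat) : ¬ pvBBoxName i = pvHintName j := by
  intro h; have := congrArg String.toList h; rw [pvHintNameList, pvBBoxNameList] at this; simp_all
@[simp] lemma pvHintName_inj (i j : Nat) : pvHintName i = pvHintName j ↔ i = j := by
  constructor
  · intro h; have := congrArg String.toList h; rw [pvHintNameList, pvHintNameList] at this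
    simp only [List.cons.injEq, true_and] at this
    have := pvToDigitsInj _ _ this; omega
  · rintro rfl; rfl
@[simp] lemma pvBBoxName_inj (i j : Nat) : pvBBoxName i = pvBBoxName j ↔ i = j := by
  constructor
  · intro h; have := congrArg String.toList h; rw [pvBBoxNameList, pvBBoxNameList] at this
    simp only [List.cons.injEq, true_and] at this
    have := pvToDigitsInj _ _ this; omega
  · rintro rfl; rfl

-- list reductions for a Nat-sized region count
lemma pvHints_natCast (m : Nat) : pvHints (↑m) = (List.range m).map pvHintName := by
  rw [pvHints, PySem.List.pyRange_zero_natCast, List.map_map]; rfl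
lemma pvBBoxes_natCast (m : Nat) : pvBBoxes (↑m) = (List.range m).map pvBBoxName := by
  rw [pvBBoxes, PySem.List.pyRange_zero_natCast, List.map_map]; rfl


-- components / pairs, and their structure
def pvComps (dmp hip : Bool) (n : Int) : List String :=
  (if dmp then [] else ["Main Prompt"]) ++ (if hip then ["Image Prompt"] else []) ++
    pvHints n ++ pvBBoxes n ++ ["Background"]

def pvPairs (C : List String) : List (String × String) := C.flatMap (fun q => C.map (fun k => (q, k)))

lemma pvMem_comps (dmp hip : Bool) (m : Nat) (q : String) :
    q ∈ pvComps dmp hip (↑m) ↔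
      (dmp = false ∧ q = "Main Prompt") ∨ (hip = true ∧ q = "Image Prompt") ∨
      (∃ i < m, q = pvHintName i) ∨ (∃ i < m, q = pvBBoxName i) ∨ q = "Background" := by
  cases dmp <;> cases hip <;>
    simp [pvComps, pvHints_natCast, pvBBoxes_natCast, List.mem_map, List.mem_range, eq_comm]

lemma pvHints_nodup (m : Nat) : (pvHints (↑m)).Nodup := by
  rw [pvHints_natCast]
  exact List.Nodup.map (fun a b h => (pvHintName_inj a b).1 h) (List.nodup_range)

lemma pvBBoxes_nodup (m : Nat) : (pvBBoxes (↑m)).Nodup := by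
  rw [pvBBoxes_natCast]
  exact List.Nodup.map (fun a b h => (pvBBoxName_inj a b).1 h) (List.nodup_range)

lemma pvComps_nodup (dmp hip : Bool) (m : Nat) : (pvComps dmp hip (↑m)).Nodup := by
  have hH := pvHints_nodup m
  have hB := pvBBoxes_nodup m
  cases dmp <;> cases hip <;>
    simp_all [pvComps, List.nodup_append, pvHints_natCast, pvBBoxes_natCast,
      List.disjoint_left, List.mem_map] <;>
    aesop

lemma pvMem_pairs (C : List String) (p : String × String) :
    p ∈ pvPairs C ↔ p.1 ∈ C ∧ p.2 ∈ C := by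
  cases p with
  | mk a b => simp [pvPairs, List.mem_flatMap]

-- dictionary bookkeeping: every rule assignment hits an existing key, so items stay
-- `pvPairs C` with an evolving value function
lemma pvKeys_of_items (C : List String) (d : PySem.Dict (String × String) Bool)
    (g : String × String → Bool) (hd : d.items = (pvPairs C).map (fun p => (p, g p))) :
    d.keys = pvPairs C := by
  simp only [PySem.Dict.keys, hd, List.map_map]
  conv_rhs => rw [← List.map_id (pvPairs C)]
  apply List.map_congr_left; intro p _; rfl

lemma pvItems_insert (C : List String) (d : PySem.Dict (String × String) Bool)
    (g : String × String → Bool) (x : String × String) (v : Bool)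
    (hd : d.items = (pvPairs C).map (fun p => (p, g p))) (hx : x ∈ pvPairs C) :
    (d.insert x v).items = (pvPairs C).map (fun p => (p, if p == x then v else g p)) := by
  have hc : d.contains x = true := by
    rw [PySem.Dict.contains_eq_decide_mem_keys, pvKeys_of_items C d g hd]; simpa
  rw [PySem.Dict.items_insert_of_contains d v hc, hd, List.map_map]
  apply List.map_congr_left; intro p _
  by_cases h : p = x <;> simp [h]

lemma pvItems_insert_true (C : List String) (d : PySem.Dict (String × String) Bool)
    (g : String × String → Bool) (x : String × String)
    (hd : d.items = (pvPairs C).map (fun p => (p, g p))) (hx : x ∈ pvPairs C) :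
    (d.insert x true).items = (pvPairs C).map (fun p => (p, g p || p == x)) := by
  rw [pvItems_insert C d g x true hd hx]
  apply List.map_congr_left; intro p _
  by_cases h : p = x <;> simp [h]

lemma pvItems_loop {α : Type} (C : List String) (l : List α) (key : α → String × String)
    (d : PySem.Dict (String × String) Bool) (g : String × String → Bool)
    (hd : d.items = (pvPairs C).map (fun p => (p, g p))) (hk : ∀ a ∈ l, key a ∈ pvPairs C) :
    (l.foldl (fun d a => d.insert (key a) true) d).items
      = (pvPairs C).map (fun p => (p, g p || l.any (fun a => p == key a))) := by
  induction l generalizing d g with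
  | nil => simpa using hd
  | cons a l ih =>
    simp only [List.foldl_cons]
    rw [ih _ (fun p => g p || p == key a)
      (pvItems_insert_true C d g (key a) hd (hk a (by simp)))
      (fun b hb => hk b (by simp [hb]))]
    apply List.map_congr_left; intro p _
    by_cases h : p = key a <;> simp [h, Bool.or_assoc]

lemma pvItems_loop2 (C : List String) (l1 l2 : List String) (key : String → String → String × String)
    (d : PySem.Dict (String × String) Bool) (g : String × String → Bool)
    (hd : d.items = (pvPairs C).map (fun p => (p, g p)))
    (hk : ∀ a ∈ l1, ∀ b ∈ l2, key a b ∈ pvPairs C) :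
    (l1.foldl (fun d a => l2.foldl (fun d b => d.insert (key a b) true) d) d).items
      = (pvPairs C).map (fun p => (p, g p || l1.any (fun a => l2.any (fun b => p == key a b)))) := by
  induction l1 generalizing d g with
  | nil => simpa using hd
  | cons a l1 ih =>
    simp only [List.foldl_cons]
    rw [ih _ (fun p => g p || l2.any (fun b => p == key a b))
      (pvItems_loop C l2 (key a) d g hd (fun b hb => hk a (by simp) b hb))
      (fun a' ha' b hb => hk a' (by simp [ha']) b hb)]
    apply List.map_congr_left; intro p _
    simp [Bool.or_assoc]

lemma pvItems_ip_loop (C : List String) (l : List String)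
    (d : PySem.Dict (String × String) Bool) (g : String × String → Bool)
    (hd : d.items = (pvPairs C).map (fun p => (p, g p)))
    (hIP : "Image Prompt" ∈ C) (hl : ∀ c ∈ l, c ∈ C) :
    (l.foldl (fun d c =>
        if c != "Image Prompt" then (d.insert ("Image Prompt", c) true).insert (c, "Image Prompt") true
        else d) d).items
      = (pvPairs C).map (fun p => (p, g p ||
          l.any (fun c => c != "Image Prompt" && (p == ("Image Prompt", c) || p == (c, "Image Prompt"))))) := by
  induction l generalizing d g with
  | nil => simpa using hd
  | cons c l ih =>
    have hcC := hl c (by simp)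
    have hl' : ∀ c' ∈ l, c' ∈ C := fun c' hc' => hl c' (by simp [hc'])
    simp only [List.foldl_cons]
    by_cases hc : c = "Image Prompt"
    · subst hc
      simp only [bne_self_eq_false, Bool.false_eq_true, if_false]
      rw [ih d g hd hl']
      apply List.map_congr_left; intro p _
      simp
    · have hne : (c != "Image Prompt") = true := by simp [hc]
      rw [hne, if_pos rfl]
      have h1 := pvItems_insert_true C d g ("Image Prompt", c) hd
        ((pvMem_pairs C _).2 ⟨hIP, hcC⟩)
      have h2 := pvItems_insert_true C _ _ (c, "Image Prompt") h1
        ((pvMem_pairs C _).2 ⟨hcC, hIP⟩)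
      rw [ih _ _ h2 hl']
      apply List.map_congr_left; intro p _
      simp [hne, Bool.or_assoc]

lemma pvItems_bg_loop (C : List String) (l imgs : List String)
    (d : PySem.Dict (String × String) Bool) (g : String × String → Bool)
    (hd : d.items = (pvPairs C).map (fun p => (p, g p)))
    (hBg : "Background" ∈ C) (hl : ∀ c ∈ l, c ∈ C) (himgs : ∀ c ∈ imgs, c ∈ C) :
    (l.foldl (fun d q =>
        let d := d.insert (q, "Background") true
        if q == "Background" then imgs.foldl (fun d k => d.insert ("Background", k) true) d
        else d.insert (q, q) true) d).items
      = (pvPairs C).map (fun p => (p, g p ||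
          l.any (fun a => p == (a, "Background") ||
            (if a == "Background" then imgs.any (fun b => p == ("Background", b)) else p == (a, a))))) := by
  induction l generalizing d g with
  | nil => simpa using hd
  | cons a l ih =>
    have haC := hl a (by simp)
    have hl' : ∀ c' ∈ l, c' ∈ C := fun c' hc' => hl c' (by simp [hc'])
    simp only [List.foldl_cons]
    have h1 := pvItems_insert_true C d g (a, "Background") hd ((pvMem_pairs C _).2 ⟨haC, hBg⟩)
    by_cases ha : a = "Background"
    · subst ha
      simp only [beq_self_eq_true, if_true]
      have h2 := pvItems_loop C imgs (fun k => ("Background", k)) _ _ h1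
        (fun b hb => (pvMem_pairs C _).2 ⟨hBg, himgs b hb⟩)
      rw [ih _ _ h2 hl']
      apply List.map_congr_left; intro p _
      simp [Bool.or_assoc]
    · have hne : (a == "Background") = false := by simp [ha]
      rw [hne]
      simp only [Bool.false_eq_true, if_false]
      have h2 := pvItems_insert_true C _ _ (a, a) h1 ((pvMem_pairs C _).2 ⟨haC, haC⟩)
      rw [ih _ _ h2 hl']
      apply List.map_congr_left; intro p _
      simp [ha, Bool.or_assoc]

-- the all-False initial dictionary: a comprehension over fresh distinct keys
lemma pvItems_init_aux (ks : List String) (hks : ks.Nodup) :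
    ∀ (qs : List String) (Q : List (String × String)) (d : PySem.Dict (String × String) Bool),
    qs.Nodup → d.items = Q.map (fun p => (p, false)) → (∀ q ∈ qs, ∀ pr ∈ Q, pr.1 ≠ q) →
    (qs.foldl (fun d q => ks.foldl (fun d k => d.insert (q, k) false) d) d).items
      = (Q ++ qs.flatMap (fun q => ks.map (fun k => (q, k)))).map (fun p => (p, false)) := by
  intro qs
  induction qs with
  | nil => intro Q d _ hd _; simpa using hd
  | cons q qs ih =>
    intro Q d hnd hd hfresh
    simp only [List.foldl_cons]
    have hcont : ∀ k ∈ ks, d.contains (q, k) = false := by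
      intro k hk
      have hkeys : d.keys = Q := by
        simp only [PySem.Dict.keys, hd, List.map_map]
        conv_rhs => rw [← List.map_id Q]
        apply List.map_congr_left; intro p _; rfl
      rw [PySem.Dict.contains_eq_decide_mem_keys, hkeys]
      simp only [decide_eq_false_iff_not]
      intro hmem
      exact hfresh q (by simp) (q, k) hmem rfl
    have hmapnd : (ks.map (fun k => (q, k))).Nodup :=
      List.Nodup.map (fun a b h => by simpa using congrArg Prod.snd h) hks
    have h1' : (ks.foldl (fun d k => d.insert (q, k) false) d).items
        = (Q ++ ks.map (fun k => (q, k))).map (fun p => (p, false)) := by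
      have h1 := PySem.Dict.items_foldl_insert_fresh ks (fun k => (q, k)) (fun _ => false) d hcont hmapnd
      simp only [] at h1
      rw [h1, hd, List.map_append, List.map_map]; rfl
    have hfresh' : ∀ q' ∈ qs, ∀ pr ∈ Q ++ ks.map (fun k => (q, k)), pr.1 ≠ q' := by
      intro q' hq' pr hpr
      rcases List.mem_append.1 hpr with h | h
      · exact hfresh q' (by simp [hq']) pr h
      · rcases List.mem_map.1 h with ⟨k, _, rfl⟩
        simp only []
        intro hqq'
        rw [hqq'] at hnd
        exact (List.nodup_cons.1 hnd).1 hq'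
    rw [ih (Q ++ ks.map (fun k => (q, k))) _ (List.nodup_cons.1 hnd).2 h1' hfresh']
    rw [List.flatMap_cons, List.append_assoc]

lemma pvItems_init (C : List String) (hC : C.Nodup) :
    (C.foldl (fun d q => C.foldl (fun d k => d.insert (q, k) false) d) PySem.Dict.empty).items
      = (pvPairs C).map (fun p => (p, false)) := by
  have := pvItems_init_aux C hC C [] PySem.Dict.empty hC (by rfl) (by simp)
  simpa [pvPairs] using this

lemma pvItems_cond (C : List String) (c : Bool) {d1 d2 : PySem.Dict (String × String) Bool}
    {g1 g2 : String × String → Bool}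
    (h1 : c = true → d1.items = (pvPairs C).map (fun p => (p, g1 p)))
    (h2 : c = false → d2.items = (pvPairs C).map (fun p => (p, g2 p))) :
    (if c then d1 else d2).items = (pvPairs C).map (fun p => (p, if c then g1 p else g2 p)) := by
  cases c
  · simpa using h2 rfl
  · simpa using h1 rfl

-- the value function A's rule chain computes at each key
def pvGA (dmp bato hip sym : Bool) (n : Int) (p : String × String) : Bool :=
  let hints := pvHints n
  let C := pvComps dmp hip n
  let imgs := pvBBoxes n ++ ["Background"]
  let texts := (if dmp then [] else ["Main Prompt"]) ++ hints
  let rng := PySem.List.pyRange 0 n 1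
  let g1 := if !dmp then (false || p == ("Main Prompt", "Main Prompt")) else false
  let g2 := g1 || hints.any (fun c => p == (c, c))
  let g3 := if hip then
      ((g2 || p == ("Image Prompt", "Image Prompt")) ||
        C.any (fun c => c != "Image Prompt" && (p == ("Image Prompt", c) || p == (c, "Image Prompt"))))
    else g2
  let g4 := if bato then (g3 || imgs.any (fun a => imgs.any (fun b => p == (a, b))))
    else (g3 || imgs.any (fun a => p == (a, "Background") ||
        (if a == "Background" then imgs.any (fun b => p == ("Background", b)) else p == (a, a))))
  let g5 := if !dmp then ((g4 || imgs.any (fun a => p == (a, "Main Prompt"))) ||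
      imgs.any (fun b => p == ("Main Prompt", b))) else g4
  let g6 := g5 || rng.any (fun i => p == ("BBox " ++ PySem.Int.toStr (i + 1), "Hint " ++ PySem.Int.toStr (i + 1)))
  if sym then (g6 || rng.any (fun i => p == ("Hint " ++ PySem.Int.toStr (i + 1), "BBox " ++ PySem.Int.toStr (i + 1))))
  else (g6 || texts.any (fun a => imgs.any (fun b => p == (a, b))))

lemma pvA_char (bbox_data : List Int) (dmp bato hip sym : Bool) :
    generate_default_attention_rules bbox_data dmp bato hip sym
      = (pvPairs (pvComps dmp hip (↑bbox_data.length))).map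
          (fun p => (p.1, p.2, pvGA dmp bato hip sym (↑bbox_data.length) p)) := by
  have hn : (if !bbox_data.isEmpty then ((bbox_data.length : Int)) else 0) = ((bbox_data.length : Nat) : Int) := by
    cases bbox_data <;> simp
  set m := bbox_data.length with hm
  simp only [generate_default_attention_rules]
  rw [hn]
  have hiff : (if !dmp then ["Main Prompt"] else []) = (if dmp then [] else ["Main Prompt"]) := by
    cases dmp <;> rfl
  rw [hiff]
  set C := pvComps dmp hip ((m : Nat) : Int) with hCdef
  have hMP : dmp = false → "Main Prompt" ∈ C := by intro h; subst h; simp [hCdef, pvComps]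
  have hIPm : hip = true → "Image Prompt" ∈ C := by intro h; subst h; simp [hCdef, pvComps]
  have hBg : "Background" ∈ C := by simp [hCdef, pvComps]
  have hHint : ∀ c ∈ pvHints ((m : Nat) : Int), c ∈ C := by
    intro c hc; simp [hCdef, pvComps]; tauto
  have hBB : ∀ c ∈ pvBBoxes ((m : Nat) : Int), c ∈ C := by
    intro c hc; simp [hCdef, pvComps]; tauto
  have hImg : ∀ c ∈ pvBBoxes ((m : Nat) : Int) ++ ["Background"], c ∈ C := by
    intro c hc
    rcases List.mem_append.1 hc with h | h
    · exact hBB c h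
    · simp at h; subst h; exact hBg
  have hTexts : ∀ c ∈ ((if dmp then [] else ["Main Prompt"]) ++ pvHints ((m : Nat) : Int)), c ∈ C := by
    intro c hc
    rcases List.mem_append.1 hc with h | h
    · cases dmp with
      | false => simp at h; subst h; exact hMP rfl
      | true => simp at h
    · exact hHint c h
  have hPair : ∀ a b : String, a ∈ C → b ∈ C → (a, b) ∈ pvPairs C :=
    fun a b ha hb => (pvMem_pairs C (a, b)).2 ⟨ha, hb⟩
  have hRkey : ∀ i ∈ PySem.List.pyRange 0 ((m : Nat) : Int) 1,
      ("BBox " ++ PySem.Int.toStr (i + 1)) ∈ C ∧ ("Hint " ++ PySem.Int.toStr (i + 1)) ∈ C := by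
    intro i hi
    rw [PySem.List.mem_pyRange_one] at hi
    have hieq : i = ((i.toNat : Nat) : Int) := by omega
    rw [hieq]
    constructor
    · exact hBB _ (by rw [pvBBoxes_natCast]; exact List.mem_map.2 ⟨i.toNat, List.mem_range.2 (by omega), rfl⟩)
    · exact hHint _ (by rw [pvHints_natCast]; exact List.mem_map.2 ⟨i.toNat, List.mem_range.2 (by omega), rfl⟩)
  have hCnd : C.Nodup := pvComps_nodup dmp hip m
  have h0 := pvItems_init C hCnd
  have h1 := pvItems_cond C (!dmp)
    (fun hc => pvItems_insert_true C _ _ ("Main Prompt", "Main Prompt") h0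
      (hPair _ _ (hMP (by simpa using hc)) (hMP (by simpa using hc))))
    (fun _ => h0)
  have h2 := pvItems_loop C (pvHints ((m : Nat) : Int)) (fun c => (c, c)) _ _ h1
    (fun c hc => hPair _ _ (hHint c hc) (hHint c hc))
  have h3 := pvItems_cond C hip
    (fun hc => pvItems_ip_loop C C _ _
      (pvItems_insert_true C _ _ ("Image Prompt", "Image Prompt") h2 (hPair _ _ (hIPm hc) (hIPm hc)))
      (hIPm hc) (fun _ h => h))
    (fun _ => h2)
  have h4 := pvItems_cond C bato
    (fun _ => pvItems_loop2 C (pvBBoxes ((m : Nat) : Int) ++ ["Background"])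
      (pvBBoxes ((m : Nat) : Int) ++ ["Background"]) (fun a b => (a, b)) _ _ h3
      (fun a ha b hb => hPair _ _ (hImg a ha) (hImg b hb)))
    (fun _ => pvItems_bg_loop C (pvBBoxes ((m : Nat) : Int) ++ ["Background"])
      (pvBBoxes ((m : Nat) : Int) ++ ["Background"]) _ _ h3 hBg hImg hImg)
  have h5 := pvItems_cond C (!dmp)
    (fun hc => pvItems_loop C (pvBBoxes ((m : Nat) : Int) ++ ["Background"]) (fun b => ("Main Prompt", b)) _ _
      (pvItems_loop C (pvBBoxes ((m : Nat) : Int) ++ ["Background"]) (fun a => (a, "Main Prompt")) _ _ h4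
        (fun a ha => hPair _ _ (hImg a ha) (hMP (by simpa using hc))))
      (fun b hb => hPair _ _ (hMP (by simpa using hc)) (hImg b hb)))
    (fun _ => h4)
  have h6 := pvItems_loop C (PySem.List.pyRange 0 ((m : Nat) : Int) 1)
    (fun i => ("BBox " ++ PySem.Int.toStr (i + 1), "Hint " ++ PySem.Int.toStr (i + 1))) _ _ h5
    (fun i hi => hPair _ _ (hRkey i hi).1 (hRkey i hi).2)
  have h7 := pvItems_cond C sym
    (fun _ => pvItems_loop C (PySem.List.pyRange 0 ((m : Nat) : Int) 1)
      (fun i => ("Hint " ++ PySem.Int.toStr (i + 1), "BBox " ++ PySem.Int.toStr (i + 1))) _ _ h6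
      (fun i hi => hPair _ _ (hRkey i hi).2 (hRkey i hi).1))
    (fun _ => pvItems_loop2 C ((if dmp then [] else ["Main Prompt"]) ++ pvHints ((m : Nat) : Int))
      (pvBBoxes ((m : Nat) : Int) ++ ["Background"]) (fun a b => (a, b)) _ _ h6
      (fun a ha b hb => hPair _ _ (hTexts a ha) (hImg b hb)))
  refine Eq.trans (congrArg (List.map (fun pr => (pr.1.1, pr.1.2, pr.2))) h7) ?_
  rw [List.map_map]
  apply List.map_congr_left
  intro p _
  rfl

lemma pvB_char (bbox_data : List Int) (dmp bato hip sym : Bool) :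
    generate_default_attention_rules_alt bbox_data dmp bato hip sym
      = (pvPairs (pvComps dmp hip (↑bbox_data.length))).map
          (fun p => (p.1, p.2, pvAllowed hip bato sym (PySem.Set.ofList (pvHints (↑bbox_data.length)))
            (PySem.Set.ofList (pvBBoxes (↑bbox_data.length) ++ ["Background"]))
            (PySem.Set.ofList ((pvBBoxes (↑bbox_data.length)).zip (pvHints (↑bbox_data.length)))) p.1 p.2)) := by
  have hn : (if !bbox_data.isEmpty then ((bbox_data.length : Int)) else 0) = ((bbox_data.length : Nat) : Int) := by
    cases bbox_data <;> simp
  simp only [generate_default_attention_rules_alt]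
  rw [hn]
  simp only [pvPairs, List.map_flatMap, List.map_map]
  rfl

@[simp] lemma pvFoldH (x : Nat) : "Hint " ++ PySem.Int.toStr ((x : Int) + 1) = pvHintName x := rfl
@[simp] lemma pvFoldB (x : Nat) : "BBox " ++ PySem.Int.toStr ((x : Int) + 1) = pvBBoxName x := rfl
@[simp] lemma pvMp_ne_hintName (i : Nat) : ¬ "Main Prompt" = pvHintName i := fun h => pvHintName_ne_mp i h.symm
@[simp] lemma pvIp_ne_hintName (i : Nat) : ¬ "Image Prompt" = pvHintName i := fun h => pvHintName_ne_ip i h.symm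
@[simp] lemma pvBg_ne_hintName (i : Nat) : ¬ "Background" = pvHintName i := fun h => pvHintName_ne_bg i h.symm
@[simp] lemma pvMp_ne_bboxName (i : Nat) : ¬ "Main Prompt" = pvBBoxName i := fun h => pvBBoxName_ne_mp i h.symm
@[simp] lemma pvIp_ne_bboxName (i : Nat) : ¬ "Image Prompt" = pvBBoxName i := fun h => pvBBoxName_ne_ip i h.symm
@[simp] lemma pvBg_ne_bboxName (i : Nat) : ¬ "Background" = pvBBoxName i := fun h => pvBBoxName_ne_bg i h.symm

-- the heart of the equivalence: at every admitted key, A's accumulated rule mutations equal B's predicate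
set_option maxHeartbeats 4000000 in
lemma pvPointwise (dmp bato hip sym : Bool) (m : Nat) (q k : String)
    (hq : q ∈ pvComps dmp hip (↑m)) (hk : k ∈ pvComps dmp hip (↑m)) :
    pvGA dmp bato hip sym (↑m) (q, k)
      = pvAllowed hip bato sym (PySem.Set.ofList (pvHints (↑m)))
          (PySem.Set.ofList (pvBBoxes (↑m) ++ ["Background"]))
          (PySem.Set.ofList ((pvBBoxes (↑m)).zip (pvHints (↑m)))) q k := by
  rcases (pvMem_comps dmp hip m q).1 hq with ⟨hdmp, rfl⟩ | ⟨hhip, rfl⟩ | ⟨i, him, rfl⟩ | ⟨i, him, rfl⟩ | rfl <;>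
    rcases (pvMem_comps dmp hip m k).1 hk with ⟨hdmp2, rfl⟩ | ⟨hhip2, rfl⟩ | ⟨j, hjm, rfl⟩ | ⟨j, hjm, rfl⟩ | rfl <;>
    (try subst dmp) <;> (try subst hip) <;>
    rw [Bool.eq_iff_iff] <;>
    simp_all [pvGA, pvAllowed, pvComps, pvHints_natCast, pvBBoxes_natCast,
      PySem.List.pyRange_zero_natCast, List.zip_map', List.any_map, Function.comp,
      List.any_eq_true, List.contains_eq_mem, List.mem_map, List.mem_range, beq_iff_eq,
      Prod.mk.injEq, Bool.or_eq_true, Bool.and_eq_true, pvFoldH, pvFoldB, PySem.Set.mem_ofList] <;>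
    first | tauto | omega | (cases sym <;> simp_all) | (cases bato <;> simp_all)

-- ===== VERDICT (by name: the statement is the Claim_ definition above) =====
theorem generate_default_attention_rules_spec : Claim_equal_generate_default_attention_rules := by
  intro bbox_data dmp bato hip sym _
  show generate_default_attention_rules bbox_data dmp bato hip sym
      = generate_default_attention_rules_alt bbox_data dmp bato hip sym
  rw [pvA_char, pvB_char]
  apply List.map_congr_left
  intro p hp
  obtain ⟨pq, pk⟩ := p
  have hqk := (pvMem_pairs _ _).1 hp
  exact congrArg (fun b => (pq, pk, b))
    (pvPointwise dmp bato hip sym bbox_data.length pq pk hqk.1 hqk.2)
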